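-- pv_equiv track=rewrite | github.com/david-hoffman/advent-of-code-2019 | day04.py | double2
-- ===== SOURCE A (Python) =====
-- def double2(key):
--     """check if there are any doubles that are isolated"""
--     # make a list of the key in the right order
--     key = list(str(key))[::-1]
--     length = 1
--     k0 = key.pop()
--     # cycle through keys
--     while key:
--         k1 = key.pop()
--         if k0 == k1:
--             length += 1
--         else:
--             if length == 2:
--                 return True
--             length = 1
--         k0 = k1
--     if length == 2:
--         return True
--     return False
-- ===== SOURCE B (Python) =====
-- def double2(key):
--     """check if there are any doubles that are isolated"""
--     s = str(key)
--     # bitmap of adjacent-equal positions, padded with False on both ends,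
--     # then look for the pattern False, True, False (an isolated double)
--     eq = [a == b for a, b in zip(s, s[1:])]
--     padded = [False] + eq + [False]
--     return any(not x and y and not z for x, y, z in zip(padded, padded[1:], padded[2:]))
-- ===== Notes on version B (the rewrite author's own statement) =====
-- stated objective: alternative
-- what changed: Instead of A's stateful run-length counter with branch-on-change and a trailing final check, B builds the bitmap of adjacent-equal positions, pads it with False, and searches it for the window pattern False,True,False (an isolated double).
import Mathlib
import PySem

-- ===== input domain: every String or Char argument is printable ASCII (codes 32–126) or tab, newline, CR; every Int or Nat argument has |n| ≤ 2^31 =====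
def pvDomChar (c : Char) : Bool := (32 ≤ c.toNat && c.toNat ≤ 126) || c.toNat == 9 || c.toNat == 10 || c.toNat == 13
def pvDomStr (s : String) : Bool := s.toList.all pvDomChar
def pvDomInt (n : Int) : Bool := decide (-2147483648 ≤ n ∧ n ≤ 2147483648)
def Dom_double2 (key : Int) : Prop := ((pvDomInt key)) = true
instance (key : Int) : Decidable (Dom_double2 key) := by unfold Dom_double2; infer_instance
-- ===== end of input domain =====

-- B drops A's stateful run-length counter: it builds the padded bitmap of adjacent-equal
-- positions and searches it for the window pattern False,True,False (alternative, same cost).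

-- ===== PORT A =====
-- A's while loop: pop chars in order, keeping (k0, length); early return on a finished run of length 2, final check after the loop.
def double2Loop (k0 : Char) (length : Int) : List Char → Bool
  | [] => length == 2
  | k1 :: rest =>
    if k0 == k1 then double2Loop k1 (length + 1) rest
    else if length == 2 then true
    else double2Loop k1 1 rest

def double2 (key : Int) : Bool :=
  match (PySem.Int.toStr key).toList with
  | [] => false  -- unreachable: str(key) is never empty
  | k0 :: rest => double2Loop k0 1 rest

-- ===== PORT B =====
-- eq = [a == b for a, b in zip(s, s[1:])]
def eqMap (s : List Char) : List Bool := List.zipWith (fun a b => a == b) s (s.drop 1)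

-- any(not x and y and not z for x, y, z in zip(padded, padded[1:], padded[2:]))
def double2_alt (key : Int) : Bool :=
  let s := (PySem.Int.toStr key).toList
  let padded := [false] ++ eqMap s ++ [false]
  ((padded.zip (padded.drop 1)).zip (padded.drop 2)).any (fun p => !p.1.1 && p.1.2 && !p.2)

-- ===== PRECONDITION & SPEC =====
def Spec_double2 (key : Int) (out : Bool) : Prop := out = double2_alt key
instance (key : Int) (out : Bool) : Decidable (Spec_double2 key out) := by unfold Spec_double2; infer_instance

-- ===== CLAIM (what is proved, stated in full; the proofs are below) =====
def Claim_equal_double2 : Prop := ∀ (key : Int), Dom_double2 key → Spec_double2 key (double2 key)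

-- ===== LEMMAS AND PROOFS =====
-- recursive form of B's sliding 3-window any
def triples : List Bool → Bool
  | a :: b :: c :: rest => (!a && b && !c) || triples (b :: c :: rest)
  | _ => false

-- recursive form of the adjacent-equality bitmap of (c :: l)
def eqsF (c : Char) : List Char → List Bool
  | [] => []
  | x :: xs => (c == x) :: eqsF x xs

theorem anyWin_eq_triples : ∀ (t : List Bool),
    ((t.zip (t.drop 1)).zip (t.drop 2)).any (fun p => !p.1.1 && p.1.2 && !p.2) = triples t := by
  intro t
  induction t with
  | nil => rfl
  | cons a t ih =>
    cases t with
    | nil => rfl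
    | cons b t =>
      cases t with
      | nil => rfl
      | cons c rest => simp [triples, ← ih, List.zip]

theorem eqMap_cons : ∀ (l : List Char) (c : Char), eqMap (c :: l) = eqsF c l := by
  intro l
  induction l with
  | nil => intro c; rfl
  | cons x xs ih => intro c; simp [eqMap, eqsF] at *; exact ih x

theorem triples_head_irrel (x y : Bool) (r : List Bool) :
    triples (x :: false :: r) = triples (y :: false :: r) := by
  cases r with
  | nil => rfl
  | cons c rs => simp [triples]

theorem loop_eq_triples : ∀ (l : List Char) (c : Char) (n : Int), 1 ≤ n →
    double2Loop c n l = triples (decide (3 ≤ n) :: decide (2 ≤ n) :: eqsF c l ++ [false]) := by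
  intro l
  induction l with
  | nil =>
    intro c n hn
    show (n == 2) = triples [decide (3 ≤ n), decide (2 ≤ n), false]
    have : triples [decide (3 ≤ n), decide (2 ≤ n), false]
        = (!decide (3 ≤ n) && decide (2 ≤ n)) := by simp [triples]
    rw [this]
    by_cases h : n = 2
    · simp [h]
    · have h1 : (n == 2) = false := by simpa using h
      rw [h1]
      by_cases h2 : 3 ≤ n <;> by_cases h3 : 2 ≤ n <;> simp [h2, h3] <;> omega
  | cons k1 rest ih =>
    intro c n hn
    show (if c == k1 then double2Loop k1 (n + 1) rest
          else if n == 2 then true else double2Loop k1 1 rest)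
        = triples (decide (3 ≤ n) :: decide (2 ≤ n) :: (c == k1) :: eqsF k1 rest ++ [false])
    have hrhs : triples (decide (3 ≤ n) :: decide (2 ≤ n) :: (c == k1) :: eqsF k1 rest ++ [false])
        = ((!decide (3 ≤ n) && decide (2 ≤ n) && !(c == k1))
            || triples (decide (2 ≤ n) :: (c == k1) :: eqsF k1 rest ++ [false])) := by
      simp [triples]
    rw [hrhs]
    by_cases hck : c = k1
    · -- equal: run continues
      have h2 : decide (2 ≤ n + 1) = true := by simp; omega
      have h3 : decide (3 ≤ n + 1) = decide (2 ≤ n) := by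
        by_cases h : 2 ≤ n <;> simp [h] <;> omega
      simp only [hck, beq_self_eq_true, if_true, Bool.not_true, Bool.and_false,
        Bool.false_or]
      rw [ih k1 (n + 1) (by omega), h3, h2]
    · have hck' : (c == k1) = false := by simpa using hck
      by_cases h2 : n = 2
      · -- finished run of length 2: early return true
        subst h2
        simp [hck']
      · have hn2 : (n == 2) = false := by simpa using h2
        have hd : (!decide (3 ≤ n) && decide (2 ≤ n)) = false := by
          by_cases h3 : 3 ≤ n <;> by_cases h4 : 2 ≤ n <;> simp [h3, h4] <;> omega
        simp only [hck', Bool.false_eq_true, if_false, hn2, hd, Bool.not_false,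
          Bool.and_true, Bool.false_or]
        rw [ih k1 1 le_rfl]
        have : (decide (3 ≤ (1:Int))) = false := by decide
        rw [this]
        have : (decide (2 ≤ (1:Int))) = false := by decide
        rw [this]
        exact triples_head_irrel false (decide (2 ≤ n)) _

theorem triples_pad (e : List Bool) :
    triples (false :: false :: e ++ [false]) = triples (false :: e ++ [false]) := by
  cases e with
  | nil => rfl
  | cons x xs => simp [triples]

-- ===== VERDICT (by name: the statement is the Claim_ definition above) =====
theorem double2_spec : Claim_equal_double2 := by
  intro key _
  unfold Spec_double2 double2 double2_alt
  rw [anyWin_eq_triples]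
  cases h : (PySem.Int.toStr key).toList with
  | nil => rfl
  | cons k0 rest =>
    rw [eqMap_cons]
    show double2Loop k0 1 rest = triples ([false] ++ eqsF k0 rest ++ [false])
    rw [loop_eq_triples rest k0 1 le_rfl]
    have h3 : (decide (3 ≤ (1:Int))) = false := by decide
    have h2 : (decide (2 ≤ (1:Int))) = false := by decide
    rw [h3, h2, triples_pad]
    rfl
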